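-- pv_equiv track=rewrite | github.com/michaeljsong99/PdfTextExtraction | ConvertPDF/pdftotext.py | infer_rows_for_group
-- ===== SOURCE A (Python) =====
-- def infer_rows_for_group(heights_dict):
--     heights_to_row_heights = {}
--     line_buffer = 10 # this represents the number of pixels that we will use to determine rows.
--     # i.e. if we have boxes with heights 89, 90, 91, 102 - we infer that the box on height 102
--     # is the beginning of a new row.
--     # For the other heights contained within the buffer, we choose the most frequent height as our top.
--     heights = sorted(heights_dict.keys())
--     heights_in_row = []
--     most_frequent_height = None
--     highest_frequency = 0
--     length = len(heights)
--     for index, height in enumerate(heights):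
--         heights_in_row.append(height)
--         if heights_dict[height] >= highest_frequency:
--             highest_frequency = heights_dict[height]
--             most_frequent_height = height
--         if (index == length - 1) or heights[index+1] - height >= line_buffer:
--             # the next height is likely on a new row (or we have reached the end).
--             for h in heights_in_row:
--                 heights_to_row_heights[h] = most_frequent_height
--             highest_frequency = 0
--             most_frequent_height = None
--             heights_in_row = []
--     return heights_to_row_heights
-- ===== SOURCE B (Python) =====
-- def infer_rows_for_group(heights_dict):
--     # Two-phase: split the sorted heights into gap-clusters (gap >= 10 starts a
--     # new cluster), then map every height of a cluster to the cluster's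
--     # representative: the height with the highest frequency, larger height on ties.
--     heights = sorted(heights_dict)
--     groups = []
--     cur = []
--     for h in heights:
--         if cur and h - cur[-1] < 10:
--             cur.append(h)
--         else:
--             if cur:
--                 groups.append(cur)
--             cur = [h]
--     if cur:
--         groups.append(cur)
--     result = {}
--     for g in groups:
--         rep = max(g, key=lambda x: (heights_dict[x], x))
--         for h in g:
--             result[h] = rep
--     return result
-- ===== Notes on version B (the rewrite author's own statement) =====
-- stated objective: simpler
-- what changed: Replaces A's single indexed pass with interleaved flush state (running best frequency, pending row buffer, enumerate/lookahead) by two plain phases: split the sorted heights into gap-clusters, then map each cluster to max(cluster, key=(frequency, height)). Pre_ excludes dicts in which some gap-cluster of the sorted heights carries only negative frequencies: there A maps those heights to None, which is not an int.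
-- outside the precondition, e.g. on infer_rows_for_group({0: -1}): A returns {0: None}, B returns {0: 0}
import Mathlib
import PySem

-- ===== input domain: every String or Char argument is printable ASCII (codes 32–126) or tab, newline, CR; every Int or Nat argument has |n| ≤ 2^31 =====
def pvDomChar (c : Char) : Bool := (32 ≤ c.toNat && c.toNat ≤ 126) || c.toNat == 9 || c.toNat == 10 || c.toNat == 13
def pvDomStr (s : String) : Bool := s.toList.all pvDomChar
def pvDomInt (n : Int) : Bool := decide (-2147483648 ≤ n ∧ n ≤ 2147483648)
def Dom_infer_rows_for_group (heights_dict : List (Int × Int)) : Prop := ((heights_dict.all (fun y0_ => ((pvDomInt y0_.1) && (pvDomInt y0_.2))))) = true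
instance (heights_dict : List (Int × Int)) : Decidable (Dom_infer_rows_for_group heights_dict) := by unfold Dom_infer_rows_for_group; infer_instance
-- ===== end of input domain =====

-- B replaces A's single indexed pass with interleaved flush state by two plain
-- phases (gap-cluster the sorted heights, then one max-by-(frequency, height)
-- per cluster); same cost, simpler decomposition.


-- ===== PORT A =====
-- heights_to_row_heights[h] = most_frequent_height; most_frequent_height = None is
-- unreachable under Pre_ (in Python it would store None, not an int), hence .getD 0.
def pvFlushA (out : PySem.Dict Int Int) (row : List Int) (mfh : Option Int) : PySem.Dict Int Int :=
  row.foldl (fun o h => o.insert h (mfh.getD 0)) out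

-- 'index == length - 1' ≡ the remaining list is empty; 'heights[index+1]' is its head.
def pvIsBreak (h : Int) : List Int → Bool
  | [] => true
  | h2 :: _ => decide (10 ≤ h2 - h)

-- the loop body of A, one call per 'height'; state = (out, heights_in_row, most_frequent_height, highest_frequency)
def pvLoopA (d : PySem.Dict Int Int) (out : PySem.Dict Int Int) (row : List Int)
    (mfh : Option Int) (hf : Int) : List Int → PySem.Dict Int Int
  | [] => out
  | h :: rest =>
    let row' := row ++ [h]
    -- heights_dict[height]: height comes from the dict's keys, so KeyError is unreachable
    let v := d.getD h 0
    let hf' := if hf ≤ v then v else hf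
    let mfh' := if hf ≤ v then some h else mfh
    if pvIsBreak h rest then pvLoopA d (pvFlushA out row' mfh') [] none 0 rest
    else pvLoopA d out row' mfh' hf' rest

def infer_rows_for_group (heights_dict : List (Int × Int)) : List (Int × Int) :=
  let d := PySem.Dict.ofList heights_dict
  let heights := PySem.List.sorted d.keys (fun x => x) false
  (pvLoopA d PySem.Dict.empty [] none 0 heights).items

-- ===== PORT B =====
-- grouping pass: state = (groups, cur); 'cur and h - cur[-1] < 10' appends to cur
def pvStep (st : List (List Int) × List Int) (h : Int) : List (List Int) × List Int :=
  match st.2.getLast? with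
  | some p => if h - p < 10 then (st.1, st.2 ++ [h]) else (st.1 ++ [st.2], [h])
  | none => (st.1, [h])

def pvGroups (ks : List Int) : List (List Int) :=
  let st := ks.foldl pvStep ([], [])
  if st.2.isEmpty then st.1 else st.1 ++ [st.2]

def infer_rows_for_group_alt (heights_dict : List (Int × Int)) : List (Int × Int) :=
  let d := PySem.Dict.ofList heights_dict
  let heights := PySem.List.sorted d.keys (fun x => x) false
  -- max(g, key=lambda x: (heights_dict[x], x)); groups are nonempty, so the none case is unreachable
  let res := (pvGroups heights).foldl (fun r g =>
      match PySem.List.max2? g (fun x => d.getD x 0) (fun x => x) with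
      | some rep => g.foldl (fun r h => r.insert h rep) r
      | none => r) PySem.Dict.empty
  res.items

-- ===== PRECONDITION & SPEC =====
-- Pre_ excludes dicts in which some gap-cluster of the sorted heights carries only
-- negative frequencies: there Python A maps those heights to None, which is not an int.
def Pre_infer_rows_for_group (heights_dict : List (Int × Int)) : Prop :=
  ∀ g ∈ pvGroups (PySem.List.sorted (PySem.Dict.ofList heights_dict).keys (fun x => x) false),
    ∃ k ∈ g, 0 ≤ (PySem.Dict.ofList heights_dict).getD k 0
instance (heights_dict : List (Int × Int)) : Decidable (Pre_infer_rows_for_group heights_dict) := by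
  unfold Pre_infer_rows_for_group; infer_instance

def pvWitness_infer_rows_for_group : (List (Int × Int)) := ([(5, 2), (7, 1), (30, 4)])

def Spec_infer_rows_for_group (heights_dict : List (Int × Int)) (out : List (Int × Int)) : Prop := out = infer_rows_for_group_alt heights_dict
instance (heights_dict : List (Int × Int)) (out : List (Int × Int)) : Decidable (Spec_infer_rows_for_group heights_dict out) := by unfold Spec_infer_rows_for_group; infer_instance

-- ===== CLAIM (what is proved, stated in full; the proofs are below) =====
def Claim_equal_infer_rows_for_group : Prop := ∀ (heights_dict : List (Int × Int)), Dom_infer_rows_for_group heights_dict → Pre_infer_rows_for_group heights_dict → Spec_infer_rows_for_group heights_dict (infer_rows_for_group heights_dict)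

-- ===== LEMMAS AND PROOFS =====

-- the (highest_frequency, most_frequent_height) update of A, as a fold over a cluster
def pvScan (d : PySem.Dict Int Int) (st : Int × Option Int) (g : List Int) : Int × Option Int :=
  g.foldl (fun p x => let v := d.getD x 0; if p.1 ≤ v then (v, some x) else p) st

-- maximal run after p with gaps < 10, and the rest
def pvTakeRun (p : Int) : List Int → List Int × List Int
  | [] => ([], [])
  | x :: t => if x - p < 10 then (x :: (pvTakeRun x t).1, (pvTakeRun x t).2) else ([], x :: t)

theorem pvTakeRun_snd_length (p : Int) (t : List Int) : (pvTakeRun p t).2.length ≤ t.length := by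
  induction t generalizing p with
  | nil => simp [pvTakeRun]
  | cons x t ih =>
    simp only [pvTakeRun]
    split
    · exact le_trans (ih x) (Nat.le_succ _)
    · simp

def pvChunks : List Int → List (List Int)
  | [] => []
  | h :: t => (h :: (pvTakeRun h t).1) :: pvChunks (pvTakeRun h t).2
termination_by l => l.length
decreasing_by
  exact Nat.lt_succ_of_le (pvTakeRun_snd_length h t)

theorem pvTakeRun_append (p : Int) (t : List Int) :
    (pvTakeRun p t).1 ++ (pvTakeRun p t).2 = t := by
  induction t generalizing p with
  | nil => simp [pvTakeRun]
  | cons x t ih =>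
    simp only [pvTakeRun]
    split
    · simpa using ih x
    · simp

-- B's grouping fold computes the run-recursive chunking
theorem pvFoldStep_eq (t : List Int) : ∀ (gs : List (List Int)) (cur : List Int) (p : Int),
    cur.getLast? = some p →
    (if (t.foldl pvStep (gs, cur)).2.isEmpty then (t.foldl pvStep (gs, cur)).1
      else (t.foldl pvStep (gs, cur)).1 ++ [(t.foldl pvStep (gs, cur)).2]) =
      gs ++ (cur ++ (pvTakeRun p t).1) :: pvChunks (pvTakeRun p t).2 := by
  induction t with
  | nil =>
    intro gs cur p hlast
    have hne : cur ≠ [] := by intro h; simp [h] at hlast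
    simp [pvTakeRun, pvChunks, List.isEmpty_iff, hne]
  | cons x t ih =>
    intro gs cur p hlast
    simp only [List.foldl_cons, pvStep, hlast, pvTakeRun]
    by_cases hx : x - p < 10
    · have := ih gs (cur ++ [x]) x (by simp)
      simp only [if_pos hx] at *
      rw [this]
      simp
    · have := ih (gs ++ [cur]) [x] x (by simp)
      simp only [if_neg hx] at *
      rw [this]
      simp [pvChunks]

theorem pvGroups_eq_chunks (ks : List Int) : pvGroups ks = pvChunks ks := by
  cases ks with
  | nil => simp [pvGroups, pvChunks]
  | cons h t =>
    have hstep : pvStep ([], []) h = ([], [h]) := by simp [pvStep]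
    have := pvFoldStep_eq t [] [h] h (by simp)
    simp only [pvGroups, List.foldl_cons, hstep]
    rw [this]
    simp [pvChunks]

-- A's loop flushes exactly at the end of each maximal run
theorem pvLoopA_run (d : PySem.Dict Int Int) (t : List Int) :
    ∀ (h : Int) (out : PySem.Dict Int Int) (row : List Int) (mfh : Option Int) (hf : Int),
    pvLoopA d out row mfh hf (h :: t) =
      pvLoopA d (pvFlushA out (row ++ h :: (pvTakeRun h t).1)
        (pvScan d (hf, mfh) (h :: (pvTakeRun h t).1)).2) [] none 0 (pvTakeRun h t).2 := by
  induction t with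
  | nil =>
    intro h out row mfh hf
    by_cases hc : hf ≤ d.getD h 0 <;>
      simp [pvLoopA, pvIsBreak, pvTakeRun, pvScan, hc]
  | cons x t ih =>
    intro h out row mfh hf
    by_cases hx : x - h < 10
    · have hbr : pvIsBreak h (x :: t) = false := by
        simp only [pvIsBreak, decide_eq_false_iff_not]; omega
      conv_lhs => rw [pvLoopA]
      simp only [hbr, Bool.false_eq_true, if_false]
      rw [ih x]
      simp only [pvTakeRun, if_pos hx]
      have harr : row ++ [h] ++ x :: (pvTakeRun x t).1 = row ++ h :: x :: (pvTakeRun x t).1 := by simp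
      rw [harr]
      congr 2
      simp only [pvScan, List.foldl_cons]
      by_cases hc : hf ≤ d.getD h 0 <;> simp [hc]
    · have hbr : pvIsBreak h (x :: t) = true := by
        simp only [pvIsBreak, decide_eq_true_eq]; omega
      conv_lhs => rw [pvLoopA]
      simp only [hbr, if_true]
      simp only [pvTakeRun, if_neg hx]
      congr 2
      by_cases hc : hf ≤ d.getD h 0 <;> simp [pvScan, hc]

theorem pvLoopA_chunks (d : PySem.Dict Int Int) (ks : List Int) :
    ∀ (out : PySem.Dict Int Int),
    pvLoopA d out [] none 0 ks =
      (pvChunks ks).foldl (fun o g => pvFlushA o g (pvScan d (0, none) g).2) out := by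
  induction ks using pvChunks.induct with
  | case1 => intro out; simp [pvLoopA, pvChunks]
  | case2 h t ih =>
    intro out
    rw [pvLoopA_run d t h out [] none 0, ih]
    simp only [pvChunks, List.foldl_cons, List.nil_append]

-- properties of A's running (highest_frequency, most_frequent_height) state over one cluster
theorem pvScan_spec (d : PySem.Dict Int Int) (g : List Int) : g.Pairwise (· < ·) →
    (0 ≤ (pvScan d (0, none) g).1 ∧ ∀ x ∈ g, d.getD x 0 ≤ (pvScan d (0, none) g).1) ∧
    (((pvScan d (0, none) g).2 = none ∧ (pvScan d (0, none) g).1 = 0 ∧ ∀ x ∈ g, d.getD x 0 < 0) ∨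
     (∃ m, (pvScan d (0, none) g).2 = some m ∧ m ∈ g ∧ d.getD m 0 = (pvScan d (0, none) g).1 ∧
        ∀ x ∈ g, d.getD x 0 < d.getD m 0 ∨ x = m ∨ (d.getD x 0 = d.getD m 0 ∧ x < m))) := by
  induction g using List.reverseRecOn with
  | nil => intro _; refine ⟨⟨le_refl 0, by simp⟩, Or.inl ⟨rfl, rfl, by simp⟩⟩
  | append_singleton g x ih =>
    intro hpw
    have hpw' : g.Pairwise (· < ·) := (List.pairwise_append.mp hpw).1
    have hlt : ∀ a ∈ g, a < x := fun a ha =>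
      (List.pairwise_append.mp hpw).2.2 a ha x (by simp)
    obtain ⟨⟨h0, hub⟩, hcase⟩ := ih hpw'
    have hstep : pvScan d (0, none) (g ++ [x]) =
        (if (pvScan d (0, none) g).1 ≤ d.getD x 0 then (d.getD x 0, some x)
         else pvScan d (0, none) g) := by
      simp [pvScan, List.foldl_append]
    by_cases hle : (pvScan d (0, none) g).1 ≤ d.getD x 0
    · rw [hstep, if_pos hle]
      refine ⟨⟨le_trans h0 hle, ?_⟩, Or.inr ⟨x, rfl, by simp, rfl, ?_⟩⟩
      · intro y hy
        rcases List.mem_append.mp hy with hy | hy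
        · exact le_trans (hub y hy) hle
        · simp at hy; subst hy; exact le_refl _
      · intro y hy
        rcases List.mem_append.mp hy with hy | hy
        · have h1 := hub y hy
          by_cases h2 : d.getD y 0 < d.getD x 0
          · exact Or.inl h2
          · exact Or.inr (Or.inr ⟨by omega, hlt y hy⟩)
        · simp at hy; subst hy; exact Or.inr (Or.inl rfl)
    · rw [hstep, if_neg hle]
      refine ⟨⟨h0, ?_⟩, ?_⟩
      · intro y hy
        rcases List.mem_append.mp hy with hy | hy
        · exact hub y hy
        · simp at hy; subst hy; omega
      · rcases hcase with ⟨hn, h1, hneg⟩ | ⟨m, hm, hmem, hvm, hall⟩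
        · refine Or.inl ⟨hn, h1, ?_⟩
          intro y hy
          rcases List.mem_append.mp hy with hy | hy
          · exact hneg y hy
          · simp at hy; subst hy; omega
        · refine Or.inr ⟨m, hm, List.mem_append.mpr (Or.inl hmem), hvm, ?_⟩
          intro y hy
          rcases List.mem_append.mp hy with hy | hy
          · exact hall y hy
          · simp at hy; subst hy; exact Or.inl (by omega)

-- max(g, key=lambda x: (d[x], x)) picks the lex-greatest (frequency, height) pair
theorem pvMax2_spec (d : PySem.Dict Int Int) (g : List Int) : g.Pairwise (· < ·) → g ≠ [] →
    ∃ m, PySem.List.max2? g (fun x => d.getD x 0) (fun x => x) = some m ∧ m ∈ g ∧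
      ∀ x ∈ g, d.getD x 0 < d.getD m 0 ∨ x = m ∨ (d.getD x 0 = d.getD m 0 ∧ x < m) := by
  induction g using List.reverseRecOn with
  | nil => intro _ h; exact absurd rfl h
  | append_singleton g x ih =>
    intro hpw _
    have hpw' : g.Pairwise (· < ·) := (List.pairwise_append.mp hpw).1
    have hlt : ∀ a ∈ g, a < x := fun a ha =>
      (List.pairwise_append.mp hpw).2.2 a ha x (by simp)
    rcases g with _ | ⟨a, g'⟩
    · exact ⟨x, by simp [PySem.List.max2?], by simp, by simp⟩
    · obtain ⟨m, hm, hmem, hall⟩ := ih hpw' (by simp)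
      have hstep : PySem.List.max2? ((a :: g') ++ [x]) (fun y => d.getD y 0) (fun y => y) =
          (if (decide (d.getD m 0 < d.getD x 0) ||
               !decide (d.getD x 0 < d.getD m 0) && decide (m < x)) = true
           then some x else some m) := by
        simp only [PySem.List.max2?] at hm ⊢
        rw [List.foldl_append, hm]
        simp
      by_cases hvx : d.getD x 0 < d.getD m 0
      · refine ⟨m, ?_, List.mem_append.mpr (Or.inl hmem), ?_⟩
        · rw [hstep]
          have : ¬ d.getD m 0 < d.getD x 0 := by omega
          simp [this, hvx]
        · intro y hy
          rcases List.mem_append.mp hy with hy | hy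
          · exact hall y hy
          · simp at hy; subst hy; exact Or.inl hvx
      · refine ⟨x, ?_, by simp, ?_⟩
        · rw [hstep]
          simp [hvx, hlt m hmem]
        · intro y hy
          rcases List.mem_append.mp hy with hy | hy
          · have hym := hall y hy
            by_cases h2 : d.getD y 0 < d.getD x 0
            · exact Or.inl h2
            · refine Or.inr (Or.inr ⟨?_, hlt y hy⟩)
              rcases hym with hc | hc | hc
              · omega
              · subst hc; omega
              · omega
          · simp at hy; subst hy; exact Or.inr (Or.inl rfl)

theorem pvArgmax_unique (d : PySem.Dict Int Int) (g : List Int) (m m' : Int)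
    (hm : m ∈ g) (hm' : m' ∈ g)
    (h1 : ∀ x ∈ g, d.getD x 0 < d.getD m 0 ∨ x = m ∨ (d.getD x 0 = d.getD m 0 ∧ x < m))
    (h2 : ∀ x ∈ g, d.getD x 0 < d.getD m' 0 ∨ x = m' ∨ (d.getD x 0 = d.getD m' 0 ∧ x < m')) :
    m = m' := by
  have a := h1 m' hm'
  have b := h2 m hm
  rcases a with a | a | a <;> rcases b with b | b | b <;> omega

-- on a strictly increasing cluster with some nonnegative frequency, A's running
-- best equals B's max-by-(frequency, height)
theorem pvChunk_rep (d : PySem.Dict Int Int) (g : List Int) (hpw : g.Pairwise (· < ·))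
    (hex : ∃ k ∈ g, 0 ≤ d.getD k 0) :
    (pvScan d (0, none) g).2 = PySem.List.max2? g (fun x => d.getD x 0) (fun x => x) := by
  obtain ⟨k, hk, hk0⟩ := hex
  have hne : g ≠ [] := by intro h; simp [h] at hk
  obtain ⟨⟨h0, hub⟩, hcase⟩ := pvScan_spec d g hpw
  obtain ⟨m', hm', hmem', hall'⟩ := pvMax2_spec d g hpw hne
  rcases hcase with ⟨_, h1, hneg⟩ | ⟨m, hm, hmem, _, hall⟩
  · have := hneg k hk; omega
  · rw [hm, hm']
    exact congrArg some (pvArgmax_unique d g m m' hmem hmem' hall hall')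

theorem pvChunks_sublist (ks : List Int) : ∀ g ∈ pvChunks ks, g.Sublist ks ∧ g ≠ [] := by
  induction ks using pvChunks.induct with
  | case1 => simp [pvChunks]
  | case2 h t ih =>
    intro g hg
    have hsplit : (pvTakeRun h t).1 ++ (pvTakeRun h t).2 = t := pvTakeRun_append h t
    rw [pvChunks] at hg
    rcases List.mem_cons.mp hg with hg | hg
    · subst hg
      refine ⟨?_, by simp⟩
      have : (h :: (pvTakeRun h t).1).Sublist ((h :: (pvTakeRun h t).1) ++ (pvTakeRun h t).2) :=
        List.sublist_append_left _ _
      simpa [hsplit] using this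
    · obtain ⟨hsub, hne⟩ := ih g hg
      refine ⟨?_, hne⟩
      have h2 : (pvTakeRun h t).2.Sublist ((pvTakeRun h t).1 ++ (pvTakeRun h t).2) :=
        List.sublist_append_right _ _
      rw [hsplit] at h2
      exact (hsub.trans h2).trans (List.sublist_cons_self h t)

-- both per-cluster writes produce the same dict, fold-wise
theorem pvFold_cong (d : PySem.Dict Int Int) (L : List (List Int))
    (hL : ∀ g ∈ L, ∃ rep, (pvScan d (0, none) g).2 = some rep ∧
        PySem.List.max2? g (fun x => d.getD x 0) (fun x => x) = some rep) :
    ∀ out, L.foldl (fun o g => pvFlushA o g (pvScan d (0, none) g).2) out =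
      L.foldl (fun r g =>
        match PySem.List.max2? g (fun x => d.getD x 0) (fun x => x) with
        | some rep => g.foldl (fun r h => r.insert h rep) r
        | none => r) out := by
  induction L with
  | nil => intro out; rfl
  | cons g L ih =>
    intro out
    obtain ⟨rep, h1, h2⟩ := hL g (by simp)
    have hrest : ∀ g' ∈ L, ∃ rep, (pvScan d (0, none) g').2 = some rep ∧
        PySem.List.max2? g' (fun x => d.getD x 0) (fun x => x) = some rep :=
      fun g' hg' => hL g' (by simp [hg'])
    have hflush : pvFlushA out g (some rep) = g.foldl (fun r h => r.insert h rep) out := by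
      simp [pvFlushA]
    simp only [List.foldl_cons, h1, h2]
    rw [hflush, ih hrest]

-- ===== VERDICT (by name: the statement is the Claim_ definition above) =====
theorem infer_rows_for_group_spec : Claim_equal_infer_rows_for_group := by
  intro hd _ hpre
  unfold Spec_infer_rows_for_group
  unfold Pre_infer_rows_for_group at hpre
  rw [pvGroups_eq_chunks] at hpre
  simp only [infer_rows_for_group, infer_rows_for_group_alt]
  rw [pvGroups_eq_chunks, pvLoopA_chunks]
  congr 1
  apply pvFold_cong
  intro g hg
  have hnd : (PySem.Dict.ofList hd).keys.Nodup := PySem.Dict.nodup_keys_ofList hd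
  have hks : (PySem.List.sorted (PySem.Dict.ofList hd).keys (fun x => x) false).Pairwise (· < ·) := by
    have := PySem.List.sorted_ofList_pairwise_lt (xs := (PySem.Dict.ofList hd).keys)
    rwa [PySem.Set.ofList_eq_self_of_nodup _ hnd] at this
  obtain ⟨hsub, hne⟩ := pvChunks_sublist _ g hg
  have hpwg : g.Pairwise (· < ·) := hks.sublist hsub
  have hex := hpre g hg
  have heq := pvChunk_rep (PySem.Dict.ofList hd) g hpwg hex
  obtain ⟨m, hm, hmem, _⟩ := pvMax2_spec (PySem.Dict.ofList hd) g hpwg hne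
  exact ⟨m, by rw [heq, hm], hm⟩
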